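-- pv_equiv track=rewrite | github.com/petervirtech/vce-trainer | vce_parser.py | _find_correct_answers
-- ===== SOURCE A (Python) =====
-- from typing import Dict, List, Optional, Tuple, Any
--
-- def _find_correct_answers(lines: List[str], start_line: int, answers: List[str]) -> Tuple[List[int], Optional[str]]:
--     """Try to find which answers are correct. Returns (indices, letters_string)."""
--     correct_answers = []
--     correct_letters = None
--
--     # Look for "Correct" indicators or similar patterns
--     for i in range(start_line, min(start_line + 30, len(lines))):
--         line = lines[i].strip()
--
--         # Look for explicit correct answer indicators
--         if line.lower().startswith('correct:'):
--             correct_part = line.replace('Correct:', '').strip().upper()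
--             correct_letters = correct_part
--
--             # Parse the letters into indices
--             for char in correct_part:
--                 if 'A' <= char <= 'D':
--                     index = ord(char) - ord('A')
--                     if index < len(answers):
--                         correct_answers.append(index)
--             break
--
--     # If no explicit indicators found, try to infer from context
--     if not correct_answers:
--         # Look for answer explanations or feedback
--         for i in range(start_line, min(start_line + 30, len(lines))):
--             line = lines[i].strip().lower()
--             if any(keyword in line for keyword in ['explanation', 'reasoning', 'because', 'therefore']):
--                 # If there's explanation, likely the first answer is correct (common pattern)
--                 if 0 < len(answers):
--                     correct_answers.append(0)
--                     correct_letters = "A"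
--                 break
--
--     # Default to first answer if still nothing found
--     if not correct_answers and answers:
--         correct_answers.append(0)
--         correct_letters = "A"
--
--     return correct_answers, correct_letters
-- ===== SOURCE B (Python) =====
-- from typing import List, Optional, Tuple
--
-- def _find_correct_answers(lines: List[str], start_line: int, answers: List[str]) -> Tuple[List[int], Optional[str]]:
--     """Single scan: only the first 'correct:' line matters; the explanation scan of the
--     original can never change the returned value, so it is dropped."""
--     for i in range(start_line, min(start_line + 30, len(lines))):
--         line = lines[i].strip()
--         if line.lower().startswith('correct:'):
--             letters = line.replace('Correct:', '').strip().upper()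
--             indices = [ord(c) - 65 for c in letters
--                        if 'A' <= c <= 'D' and ord(c) - 65 < len(answers)]
--             if indices:
--                 return indices, letters
--             return ([0], "A") if answers else ([], letters)
--     return ([0], "A") if answers else ([], None)
-- ===== Notes on version B (the rewrite author's own statement) =====
-- stated objective: simpler
-- what changed: B replaces A's two scans over the 30-line window with a single scan that stops at the first 'correct:' line and decides the result there; the explanation-keyword scan is dropped entirely because A's default rule makes it irrelevant to the returned value (proved in Lean).
import Mathlib
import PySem

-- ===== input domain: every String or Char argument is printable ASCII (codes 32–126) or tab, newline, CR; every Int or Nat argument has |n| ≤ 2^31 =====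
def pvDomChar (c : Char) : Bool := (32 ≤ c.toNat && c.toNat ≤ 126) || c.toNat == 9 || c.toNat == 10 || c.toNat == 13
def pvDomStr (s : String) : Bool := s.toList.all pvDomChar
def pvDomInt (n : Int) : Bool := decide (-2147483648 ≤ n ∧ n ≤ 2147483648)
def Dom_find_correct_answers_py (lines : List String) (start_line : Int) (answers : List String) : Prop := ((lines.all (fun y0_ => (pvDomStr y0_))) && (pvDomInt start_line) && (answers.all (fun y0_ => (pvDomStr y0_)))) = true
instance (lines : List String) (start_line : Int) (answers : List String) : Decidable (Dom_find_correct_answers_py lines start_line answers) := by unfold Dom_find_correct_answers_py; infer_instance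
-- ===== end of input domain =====

-- B drops A's second (explanation-keyword) scan entirely: whatever it finds, A's final
-- value is already determined by the first 'correct:' line and the default rule
-- (objective: simpler, one pass instead of two).

-- ===== PORT A =====

-- the body of A's first loop once the 'correct:' branch fires: parse letters into indices
def pvParseCorrect (line : String) (answers : List String) : List Int × String :=
  let correct_part := PySem.Str.upper (PySem.Str.strip (PySem.Str.replace line "Correct:" ""))
  let ca := correct_part.toList.foldl (fun acc char =>
      if 'A' ≤ char ∧ char ≤ 'D' then
        let index : Int := (char.toNat : Int) - 65
        if index < (answers.length : Int) then acc ++ [index] else acc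
      else acc) []
  (ca, correct_part)

-- A's first loop: break with the parsed result at the first 'correct:' line
def pvLoop1 (lines : List String) (answers : List String) : List Int → Option (List Int × String)
  | [] => none
  | i :: rest =>
      let line := PySem.Str.strip ((PySem.List.pyGet? lines i).getD "")
      if PySem.Str.startswith (PySem.Str.lower line) "correct:" then
        some (pvParseCorrect line answers)
      else pvLoop1 lines answers rest

-- A's second loop: break at the first line containing an explanation keyword
def pvLoop2 (lines : List String) : List Int → Bool
  | [] => false
  | i :: rest =>
      let line := PySem.Str.lower (PySem.Str.strip ((PySem.List.pyGet? lines i).getD ""))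
      if PySem.Str.isIn "explanation" line || PySem.Str.isIn "reasoning" line ||
         PySem.Str.isIn "because" line || PySem.Str.isIn "therefore" line then true
      else pvLoop2 lines rest

def find_correct_answers_py (lines : List String) (start_line : Int) (answers : List String) : List Int × Option String :=
  let idxs := PySem.List.pyRange start_line (min (start_line + 30) (lines.length : Int)) 1
  let st : List Int × Option String :=
    match pvLoop1 lines answers idxs with
    | some (ca, cp) => (ca, some cp)
    | none => ([], none)
  let st :=
    if st.1 = [] then
      if pvLoop2 lines idxs then
        if 0 < answers.length then ([0], some "A") else st
      else st
    else st
  if st.1 = [] ∧ answers ≠ [] then ([0], some "A") else st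

-- ===== PORT B =====

def pvLoopB (lines : List String) (answers : List String) : List Int → List Int × Option String
  | [] => if answers ≠ [] then ([0], some "A") else ([], none)
  | i :: rest =>
      let line := PySem.Str.strip ((PySem.List.pyGet? lines i).getD "")
      if PySem.Str.startswith (PySem.Str.lower line) "correct:" then
        let letters := PySem.Str.upper (PySem.Str.strip (PySem.Str.replace line "Correct:" ""))
        let indices := (letters.toList.filter
            (fun c => 'A' ≤ c ∧ c ≤ 'D' ∧ (c.toNat : Int) - 65 < (answers.length : Int))).map
            (fun c => ((c.toNat : Int) - 65))
        if indices ≠ [] then (indices, some letters)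
        else if answers ≠ [] then ([0], some "A") else ([], some letters)
      else pvLoopB lines answers rest

def find_correct_answers_py_alt (lines : List String) (start_line : Int) (answers : List String) : List Int × Option String :=
  pvLoopB lines answers (PySem.List.pyRange start_line (min (start_line + 30) (lines.length : Int)) 1)

-- ===== PRECONDITION & SPEC =====
-- A raises IndexError iff start_line < -len(lines) (the loop then reads lines[start_line]).
def Pre_find_correct_answers_py (lines : List String) (start_line : Int) (answers : List String) : Prop :=
  -(lines.length : Int) ≤ start_line
instance (lines : List String) (start_line : Int) (answers : List String) : Decidable (Pre_find_correct_answers_py lines start_line answers) := by unfold Pre_find_correct_answers_py; infer_instance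

def pvWitness_find_correct_answers_py : List String × Int × List String :=
  (["Q?", "Correct: B", "because"], 0, ["yes", "no"])

def Spec_find_correct_answers_py (lines : List String) (start_line : Int) (answers : List String) (out : List Int × Option String) : Prop := out = find_correct_answers_py_alt lines start_line answers
instance (lines : List String) (start_line : Int) (answers : List String) (out : List Int × Option String) : Decidable (Spec_find_correct_answers_py lines start_line answers out) := by unfold Spec_find_correct_answers_py; infer_instance

-- ===== CLAIM (what is proved, stated in full; the proofs are below) =====
def Claim_equal_find_correct_answers_py : Prop := ∀ (lines : List String) (start_line : Int) (answers : List String), Dom_find_correct_answers_py lines start_line answers → Pre_find_correct_answers_py lines start_line answers → Spec_find_correct_answers_py lines start_line answers (find_correct_answers_py lines start_line answers)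

-- ===== LEMMAS AND PROOFS =====

-- A's post-loop combination (loop1 result, loop2 flag, defaults), named for the proofs
def pvCombine (answers : List String) (r : Option (List Int × String)) (ex : Bool) : List Int × Option String :=
  let st : List Int × Option String :=
    match r with
    | some (ca, cp) => (ca, some cp)
    | none => ([], none)
  let st :=
    if st.1 = [] then
      if ex then
        if 0 < answers.length then ([0], some "A") else st
      else st
    else st
  if st.1 = [] ∧ answers ≠ [] then ([0], some "A") else st

theorem pvA_eq_combine (lines : List String) (start_line : Int) (answers : List String) :
    find_correct_answers_py lines start_line answers =
      pvCombine answers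
        (pvLoop1 lines answers (PySem.List.pyRange start_line (min (start_line + 30) (lines.length : Int)) 1))
        (pvLoop2 lines (PySem.List.pyRange start_line (min (start_line + 30) (lines.length : Int)) 1)) := rfl

-- A's appending fold over the letters equals B's filter-then-map comprehension
theorem pvParse_eq (cs : List Char) (answers : List String) (acc : List Int) :
    cs.foldl (fun acc char =>
      if 'A' ≤ char ∧ char ≤ 'D' then
        let index : Int := (char.toNat : Int) - 65
        if index < (answers.length : Int) then acc ++ [index] else acc
      else acc) acc
    = acc ++ (cs.filter
        (fun c => 'A' ≤ c ∧ c ≤ 'D' ∧ (c.toNat : Int) - 65 < (answers.length : Int))).map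
        (fun c => ((c.toNat : Int) - 65)) := by
  induction cs generalizing acc with
  | nil => simp
  | cons c cs ih =>
      simp only [List.foldl_cons, List.filter_cons]
      by_cases h1 : 'A' ≤ c ∧ c ≤ 'D'
      · by_cases h2 : (c.toNat : Int) - 65 < (answers.length : Int)
        · simp [h1, h2, ih]
        · simp [h1, h2, ih]
      · have h3 : ¬ ('A' ≤ c ∧ c ≤ 'D' ∧ (c.toNat : Int) - 65 < (answers.length : Int)) := by tauto
        simp [h1, h3, ih]

-- the shape of B's 'correct:' branch equals pvCombine of a found loop1 value
theorem pvBranch_eq_combine (answers : List String) (ca : List Int) (cp : String) (ex : Bool) :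
    (if ca ≠ [] then (ca, some cp)
     else if answers ≠ [] then (([0] : List Int), some "A") else (([] : List Int), some cp))
    = pvCombine answers (some (ca, cp)) ex := by
  unfold pvCombine
  by_cases hca : ca = []
  · by_cases ha : answers = []
    · cases ex <;> simp [hca, ha]
    · have hlen : 0 < answers.length := List.length_pos_iff.mpr ha
      cases ex <;> simp [hca, ha, hlen]
  · simp [hca]

-- B's single loop computes A's composition of loop1, loop2 and the default rule,
-- for ANY index list: the explanation scan never changes the final value.
theorem pvLoopB_eq (lines answers : List String) (idxs : List Int) :
    pvLoopB lines answers idxs =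
      pvCombine answers (pvLoop1 lines answers idxs) (pvLoop2 lines idxs) := by
  induction idxs with
  | nil =>
      by_cases ha : answers = [] <;> simp [pvLoopB, pvLoop1, pvLoop2, pvCombine, ha]
  | cons i rest ih =>
      by_cases hc : PySem.Str.startswith
          (PySem.Str.lower (PySem.Str.strip ((PySem.List.pyGet? lines i).getD ""))) "correct:"
      · have hP : pvLoop1 lines answers (i :: rest) =
            some (pvParseCorrect (PySem.Str.strip ((PySem.List.pyGet? lines i).getD "")) answers) := by
          simp only [pvLoop1, hc, if_pos]
        rw [hP]
        have hB : pvLoopB lines answers (i :: rest) =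
            (let letters := PySem.Str.upper (PySem.Str.strip (PySem.Str.replace
                (PySem.Str.strip ((PySem.List.pyGet? lines i).getD "")) "Correct:" ""))
             let indices := (letters.toList.filter
                (fun c => 'A' ≤ c ∧ c ≤ 'D' ∧ (c.toNat : Int) - 65 < (answers.length : Int))).map
                (fun c => ((c.toNat : Int) - 65))
             if indices ≠ [] then (indices, some letters)
             else if answers ≠ [] then (([0] : List Int), some "A") else ([], some letters)) := by
          simp only [pvLoopB, hc, if_pos]
        rw [hB]
        have hPC : pvParseCorrect (PySem.Str.strip ((PySem.List.pyGet? lines i).getD "")) answers =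
            (let letters := PySem.Str.upper (PySem.Str.strip (PySem.Str.replace
                (PySem.Str.strip ((PySem.List.pyGet? lines i).getD "")) "Correct:" ""))
             ((letters.toList.filter
                (fun c => 'A' ≤ c ∧ c ≤ 'D' ∧ (c.toNat : Int) - 65 < (answers.length : Int))).map
                (fun c => ((c.toNat : Int) - 65)), letters)) := by
          simp only [pvParseCorrect, pvParse_eq, List.nil_append]
        rw [hPC]
        exact pvBranch_eq_combine answers _ _ _
      · have h1 : pvLoop1 lines answers (i :: rest) = pvLoop1 lines answers rest := by
          simp only [pvLoop1, hc, Bool.false_eq_true, if_false]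
        have h2 : pvLoop2 lines (i :: rest) = pvLoop2 lines rest ∨ pvLoop2 lines (i :: rest) = true := by
          simp only [pvLoop2]; split <;> simp
        have hB : pvLoopB lines answers (i :: rest) = pvLoopB lines answers rest := by
          simp only [pvLoopB, hc, Bool.false_eq_true, if_false]
        rw [hB, h1, ih]
        -- pvCombine ignores ex when loop1 misses only through the answers-default; show both ex agree
        rcases h2 with h2 | h2
        · rw [h2]
        · -- the explanation flag may flip from false to true; pvCombine's value is unchanged
          cases hL : pvLoop1 lines answers rest with
          | none =>
              by_cases ha : answers = []
              · simp [pvCombine, h2, ha]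
              · have hlen : 0 < answers.length := List.length_pos_iff.mpr ha
                cases hex : pvLoop2 lines rest <;> simp [pvCombine, h2, hex, ha, hlen]
          | some p =>
              obtain ⟨ca, cp⟩ := p
              by_cases hca : ca = []
              · by_cases ha : answers = []
                · simp [pvCombine, h2, ha, hca]
                · have hlen : 0 < answers.length := List.length_pos_iff.mpr ha
                  cases hex : pvLoop2 lines rest <;> simp [pvCombine, h2, hex, ha, hca, hlen]
              · simp [pvCombine, hca]

-- ===== VERDICT (by name: the statement is the Claim_ definition above) =====
theorem find_correct_answers_py_spec : Claim_equal_find_correct_answers_py := by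
  intro lines start_line answers _ _
  unfold Spec_find_correct_answers_py
  rw [pvA_eq_combine, find_correct_answers_py_alt, pvLoopB_eq]
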